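-- pv_equiv track=rewrite | github.com/yejinjinzhang-design/AI-agent-trading | coral-framework/examples/kernel_builder/eval/utils.py | myhash
-- ===== SOURCE A (Python) =====
-- HASH_STAGES = [
--     ("+", 0x7ED55D16, "+", "<<", 12),
--     ("^", 0xC761C23C, "^", ">>", 19),
--     ("+", 0x165667B1, "+", "<<", 5),
--     ("+", 0xD3A2646C, "^", "<<", 9),
--     ("+", 0xFD7046C5, "+", "<<", 3),
--     ("^", 0xB55A4F09, "^", ">>", 16),
-- ]
--
-- def myhash(a: int) -> int:
--     """A simple 32-bit hash function."""
--     fns = {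
--         "+": lambda x, y: x + y,
--         "^": lambda x, y: x ^ y,
--         "<<": lambda x, y: x << y,
--         ">>": lambda x, y: x >> y,
--     }
--
--     def r(x: int) -> int:
--         return x % (2**32)
--
--     for op1, val1, op2, op3, val3 in HASH_STAGES:
--         a = r(fns[op2](r(fns[op1](a, val1)), r(fns[op3](a, val3))))
--
--     return a
-- ===== SOURCE B (Python) =====
-- def myhash(a: int) -> int:
--     """32-bit hash computed on two 16-bit limbs with explicit carry/shift handling."""
--     m = a % 0x100000000
--     lo, hi = m % 0x10000, m // 0x10000
--
--     def add(xl, xh, yl, yh):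
--         s = xl + yl
--         return s % 0x10000, (xh + yh + s // 0x10000) % 0x10000
--
--     def shl(xl, xh, k):
--         return xl * 2 ** k % 0x10000, (xh * 2 ** k + xl // 2 ** (16 - k)) % 0x10000
--
--     # a = (a + 0x7ED55D16 + (a << 12)) mod 2^32
--     sl, sh = add(lo, hi, 0x5D16, 0x7ED5)
--     tl, th = shl(lo, hi, 12)
--     lo, hi = add(sl, sh, tl, th)
--     # a = a ^ 0xC761C23C ^ (a >> 19)   (a >> 19 has only 13 bits: hi // 8)
--     lo, hi = lo ^ 0xC23C ^ hi // 8, hi ^ 0xC761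
--     # a = (a + 0x165667B1 + (a << 5)) mod 2^32
--     sl, sh = add(lo, hi, 0x67B1, 0x1656)
--     tl, th = shl(lo, hi, 5)
--     lo, hi = add(sl, sh, tl, th)
--     # a = ((a + 0xD3A2646C) ^ (a << 9)) mod 2^32
--     sl, sh = add(lo, hi, 0x646C, 0xD3A2)
--     tl, th = shl(lo, hi, 9)
--     lo, hi = sl ^ tl, sh ^ th
--     # a = (a + 0xFD7046C5 + (a << 3)) mod 2^32
--     sl, sh = add(lo, hi, 0x46C5, 0xFD70)
--     tl, th = shl(lo, hi, 3)
--     lo, hi = add(sl, sh, tl, th)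
--     # a = a ^ 0xB55A4F09 ^ (a >> 16)   (a >> 16 is exactly hi)
--     lo, hi = lo ^ 0x4F09 ^ hi, hi ^ 0xB55A
--     return lo + 0x10000 * hi
-- ===== Notes on version B (the rewrite author's own statement) =====
-- stated objective: alternative
-- what changed: Replaced A's table-driven 32-bit masked arithmetic by double-precision arithmetic on two 16-bit limbs: the value is split once into (lo, hi), each stage is computed with an explicit ripple-carry addition, per-limb shifts with cross-limb carry, and limbwise xor (the >>19 and >>16 right shifts reduce to operations on the high limb alone), and the limbs are recombined at the end; no 32-bit mask is ever taken.
import Mathlib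
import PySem

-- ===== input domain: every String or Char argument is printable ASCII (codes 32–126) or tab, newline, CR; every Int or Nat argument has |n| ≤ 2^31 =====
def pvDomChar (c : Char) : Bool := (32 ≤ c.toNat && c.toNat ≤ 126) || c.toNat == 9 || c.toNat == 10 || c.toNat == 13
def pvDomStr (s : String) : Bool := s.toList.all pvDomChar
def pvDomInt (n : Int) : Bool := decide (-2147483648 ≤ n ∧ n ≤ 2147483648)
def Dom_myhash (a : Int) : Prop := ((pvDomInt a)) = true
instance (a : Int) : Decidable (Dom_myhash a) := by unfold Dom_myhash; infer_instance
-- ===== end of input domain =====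

-- B replaces A's table-driven 32-bit masked arithmetic by double-precision arithmetic on two
-- 16-bit limbs (explicit ripple carry, per-limb shifts, limbwise xor), recombined at the end
-- (objective: alternative).

-- ===== PORT A =====
def myhashStages : List (String × Int × String × String × Int) :=
  [("+", 0x7ED55D16, "+", "<<", 12),
   ("^", 0xC761C23C, "^", ">>", 19),
   ("+", 0x165667B1, "+", "<<", 5),
   ("+", 0xD3A2646C, "^", "<<", 9),
   ("+", 0xFD7046C5, "+", "<<", 3),
   ("^", 0xB55A4F09, "^", ">>", 16)]

-- A's `fns` dict of operator lambdas, as a lookup by key (Python ^ is Int.xor; Python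
-- x << y / x >> y with the table's nonnegative literal amounts are <<< / >>> with the
-- amount read as a Nat — exact here since y ∈ {12,19,5,9,3,16}).
def myhashFns (op : String) : Int → Int → Int :=
  if op = "+" then fun x y => x + y
  else if op = "^" then fun x y => Int.xor x y
  else if op = "<<" then fun x y => x <<< y.toNat
  else fun x y => x >>> y.toNat

-- A's helper r(x) = x % (2**32)
def myhashR (x : Int) : Int := PySem.Int.mod x ((2:Int) ^ 32)

def myhash (a : Int) : Int :=
  myhashStages.foldl
    (fun a s =>
      match s with
      | (op1, val1, op2, op3, val3) =>
        myhashR (myhashFns op2 (myhashR (myhashFns op1 a val1)) (myhashR (myhashFns op3 a val3))))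
    a

-- ===== PORT B =====
-- Source B's `add`: 16-bit limb pairs added with an explicit ripple carry
def myhashAdd (xl xh yl yh : Int) : Int × Int :=
  let s := xl + yl
  (PySem.Int.mod s 0x10000, PySem.Int.mod (xh + yh + PySem.Int.floordiv s 0x10000) 0x10000)

-- Source B's `shl`: left shift by k < 16 on a limb pair, low limb's top bits carried into the high limb
def myhashShl (xl xh : Int) (k : Nat) : Int × Int :=
  (PySem.Int.mod (xl * 2 ^ k) 0x10000,
   PySem.Int.mod (xh * 2 ^ k + PySem.Int.floordiv xl (2 ^ (16 - k))) 0x10000)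

def myhash_alt (a : Int) : Int :=
  let m := PySem.Int.mod a 0x100000000
  let lo0 := PySem.Int.mod m 0x10000
  let hi0 := PySem.Int.floordiv m 0x10000
  -- a = (a + 0x7ED55D16 + (a << 12)) mod 2^32
  let s1 := myhashAdd lo0 hi0 0x5D16 0x7ED5
  let t1 := myhashShl lo0 hi0 12
  let p1 := myhashAdd s1.1 s1.2 t1.1 t1.2
  -- a = a ^ 0xC761C23C ^ (a >> 19)   (a >> 19 has only 13 bits: hi // 8)
  let lo2 := Int.xor (Int.xor p1.1 0xC23C) (PySem.Int.floordiv p1.2 8)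
  let hi2 := Int.xor p1.2 0xC761
  -- a = (a + 0x165667B1 + (a << 5)) mod 2^32
  let s3 := myhashAdd lo2 hi2 0x67B1 0x1656
  let t3 := myhashShl lo2 hi2 5
  let p3 := myhashAdd s3.1 s3.2 t3.1 t3.2
  -- a = ((a + 0xD3A2646C) ^ (a << 9)) mod 2^32
  let s4 := myhashAdd p3.1 p3.2 0x646C 0xD3A2
  let t4 := myhashShl p3.1 p3.2 9
  let lo4 := Int.xor s4.1 t4.1
  let hi4 := Int.xor s4.2 t4.2
  -- a = (a + 0xFD7046C5 + (a << 3)) mod 2^32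
  let s5 := myhashAdd lo4 hi4 0x46C5 0xFD70
  let t5 := myhashShl lo4 hi4 3
  let p5 := myhashAdd s5.1 s5.2 t5.1 t5.2
  -- a = a ^ 0xB55A4F09 ^ (a >> 16)   (a >> 16 is exactly hi)
  let lo6 := Int.xor (Int.xor p5.1 0x4F09) p5.2
  let hi6 := Int.xor p5.2 0xB55A
  lo6 + 0x10000 * hi6

-- ===== PRECONDITION & SPEC =====
def Spec_myhash (a : Int) (out : Int) : Prop := out = myhash_alt a
instance (a : Int) (out : Int) : Decidable (Spec_myhash a out) := by unfold Spec_myhash; infer_instance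

-- ===== CLAIM (what is proved, stated in full; the proofs are below) =====
def Claim_equal_myhash : Prop := ∀ (a : Int), Dom_myhash a → Spec_myhash a (myhash a)

-- ===== LEMMAS AND PROOFS =====

-- PySem mod/floordiv with the positive literal divisors used here are % and /
theorem pvModM (x : Int) : PySem.Int.mod x ((2:Int) ^ 32) = x % 4294967296 := by
  have h : PySem.Int.mod x ((2:Int) ^ 32) = x % ((2:Int) ^ 32) :=
    PySem.Int.mod_eq_emod_of_pos (by norm_num)
  rw [h]; norm_num
theorem pvMod16 (x : Int) : PySem.Int.mod x (0x10000 : Int) = x % 65536 :=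
  PySem.Int.mod_eq_emod_of_pos (by norm_num)
theorem pvModM' (x : Int) : PySem.Int.mod x (0x100000000 : Int) = x % 4294967296 :=
  PySem.Int.mod_eq_emod_of_pos (by norm_num)
theorem pvDiv16 (x : Int) : PySem.Int.floordiv x (0x10000 : Int) = x / 65536 :=
  PySem.Int.floordiv_eq_ediv_of_pos (by norm_num)
theorem pvDiv8 (x : Int) : PySem.Int.floordiv x (8 : Int) = x / 8 :=
  PySem.Int.floordiv_eq_ediv_of_pos (by norm_num)
theorem pvDivP (x : Int) (k : Nat) : PySem.Int.floordiv x ((2:Int) ^ k) = x / 2 ^ k :=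
  PySem.Int.floordiv_eq_ediv_of_pos (by positivity)

-- casts between Int bit operations on Nat casts and the Nat operations
theorem pvXorCast (m n : Nat) : Int.xor (m : Int) (n : Int) = ((m ^^^ n : Nat) : Int) := rfl
theorem pvShrCast (m k : Nat) : ((m : Int) >>> k) = ((m >>> k : Nat) : Int) := rfl

-- the core: xor splits across a 16-bit limb decomposition (Nat form, by testBit)
theorem pvLimbXorNat (l h l' h' : Nat) (hl : l < 65536) (hl' : l' < 65536) :
    (l + 65536 * h) ^^^ (l' + 65536 * h') = (l ^^^ l') + 65536 * (h ^^^ h') := by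
  have hx : (l ^^^ l') < 2 ^ 16 := Nat.xor_lt_two_pow (by omega) (by omega)
  apply Nat.eq_of_testBit_eq
  intro i
  rw [show l + 65536 * h = 2 ^ 16 * h + l by omega,
      show l' + 65536 * h' = 2 ^ 16 * h' + l' by omega,
      show (l ^^^ l') + 65536 * (h ^^^ h') = 2 ^ 16 * (h ^^^ h') + (l ^^^ l') by omega,
      Nat.testBit_xor,
      Nat.testBit_two_pow_mul_add _ (by omega), Nat.testBit_two_pow_mul_add _ (by omega),
      Nat.testBit_two_pow_mul_add _ hx]
  split_ifs with hi
  · rw [Nat.testBit_xor]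
  · rw [Nat.testBit_xor]

theorem pvXorNonneg (x y : Int) (hx : 0 ≤ x) (hy : 0 ≤ y) : 0 ≤ Int.xor x y := by
  lift x to Nat using hx; lift y to Nat using hy
  rw [pvXorCast]; exact Int.natCast_nonneg _

theorem pvXorLt16 (x y : Int) (hx : 0 ≤ x) (h1 : x < 65536) (hy : 0 ≤ y) (h2 : y < 65536) :
    Int.xor x y < 65536 := by
  lift x to Nat using hx; lift y to Nat using hy
  rw [pvXorCast]
  have : (x ^^^ y) < 2 ^ 16 := Nat.xor_lt_two_pow (by exact_mod_cast h1) (by exact_mod_cast h2)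
  exact_mod_cast this

theorem pvXorZero (x : Int) (hx : 0 ≤ x) : Int.xor x 0 = x := by
  lift x to Nat using hx
  rw [show ((0:Int)) = ((0:Nat):Int) by norm_num, pvXorCast, Nat.xor_zero]

theorem pvShrDiv (x : Int) (k : Nat) (hx : 0 ≤ x) : x >>> k = x / 2 ^ k := by
  lift x to Nat using hx
  rw [pvShrCast, Nat.shiftRight_eq_div_pow]
  exact_mod_cast rfl

-- xor of nonnegative ints splits across 16-bit limbs
theorem pvIntLimbXor (x y : Int) (hx : 0 ≤ x) (hy : 0 ≤ y) :
    Int.xor x y = Int.xor (x % 65536) (y % 65536) + 65536 * Int.xor (x / 65536) (y / 65536) := by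
  lift x to Nat using hx; lift y to Nat using hy
  have ex : ((x:Int) % 65536) = ((x % 65536 : Nat) : Int) := by exact_mod_cast rfl
  have ey : ((y:Int) % 65536) = ((y % 65536 : Nat) : Int) := by exact_mod_cast rfl
  have dx : ((x:Int) / 65536) = ((x / 65536 : Nat) : Int) := by exact_mod_cast rfl
  have dy : ((y:Int) / 65536) = ((y / 65536 : Nat) : Int) := by exact_mod_cast rfl
  rw [ex, ey, dx, dy, pvXorCast, pvXorCast, pvXorCast]
  have : (x ^^^ y) = ((x % 65536) ^^^ (y % 65536)) + 65536 * ((x / 65536) ^^^ (y / 65536)) := by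
    conv_lhs => rw [show x = x % 65536 + 65536 * (x / 65536) by omega,
                    show y = y % 65536 + 65536 * (y / 65536) by omega]
    exact pvLimbXorNat _ _ _ _ (by omega) (by omega)
  exact_mod_cast this

-- A's six stages, each as the literal foldl body at its stage tuple
def pvStep (s : String × Int × String × String × Int) (a : Int) : Int :=
  match s with
  | (op1, val1, op2, op3, val3) =>
    myhashR (myhashFns op2 (myhashR (myhashFns op1 a val1)) (myhashR (myhashFns op3 a val3)))

-- B's six stages on a limb pair, each the corresponding block of myhash_alt
def pvB1 (l h : Int) : Int × Int :=
  let s := myhashAdd l h 0x5D16 0x7ED5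
  let t := myhashShl l h 12
  myhashAdd s.1 s.2 t.1 t.2
def pvB2 (l h : Int) : Int × Int :=
  (Int.xor (Int.xor l 0xC23C) (PySem.Int.floordiv h 8), Int.xor h 0xC761)
def pvB3 (l h : Int) : Int × Int :=
  let s := myhashAdd l h 0x67B1 0x1656
  let t := myhashShl l h 5
  myhashAdd s.1 s.2 t.1 t.2
def pvB4 (l h : Int) : Int × Int :=
  let s := myhashAdd l h 0x646C 0xD3A2
  let t := myhashShl l h 9
  (Int.xor s.1 t.1, Int.xor s.2 t.2)
def pvB5 (l h : Int) : Int × Int :=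
  let s := myhashAdd l h 0x46C5 0xFD70
  let t := myhashShl l h 3
  myhashAdd s.1 s.2 t.1 t.2
def pvB6 (l h : Int) : Int × Int :=
  (Int.xor (Int.xor l 0x4F09) h, Int.xor h 0xB55A)

-- the invariant: q is the 16-bit limb decomposition of the 32-bit value p
def pvRep (p : Int) (q : Int × Int) : Prop :=
  0 ≤ q.1 ∧ q.1 < 65536 ∧ 0 ≤ q.2 ∧ q.2 < 65536 ∧ q.1 + 65536 * q.2 = p ∧
    0 ≤ p ∧ p < 4294967296

def pvP (f : Int → Int → Int × Int) (q : Int × Int) : Int × Int := f q.1 q.2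

theorem pvDecomp (a : Int) : myhash a = pvStep ("^", 0xB55A4F09, "^", ">>", 16)
    (pvStep ("+", 0xFD7046C5, "+", "<<", 3)
      (pvStep ("+", 0xD3A2646C, "^", "<<", 9)
        (pvStep ("+", 0x165667B1, "+", "<<", 5)
          (pvStep ("^", 0xC761C23C, "^", ">>", 19)
            (pvStep ("+", 0x7ED55D16, "+", "<<", 12) a))))) := by
  simp only [myhash, myhashStages, List.foldl_cons, List.foldl_nil, pvStep]

theorem pvAltDecomp (a : Int) : myhash_alt a =
    (pvP pvB6 (pvP pvB5 (pvP pvB4 (pvP pvB3 (pvP pvB2 (pvP pvB1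
        (PySem.Int.mod (PySem.Int.mod a 0x100000000) 0x10000,
         PySem.Int.floordiv (PySem.Int.mod a 0x100000000) 0x10000))))))).1
    + 0x10000 * (pvP pvB6 (pvP pvB5 (pvP pvB4 (pvP pvB3 (pvP pvB2 (pvP pvB1
        (PySem.Int.mod (PySem.Int.mod a 0x100000000) 0x10000,
         PySem.Int.floordiv (PySem.Int.mod a 0x100000000) 0x10000))))))).2 := by
  simp only [myhash_alt, pvP, pvB1, pvB2, pvB3, pvB4, pvB5, pvB6]

-- ripple-carry addition of limb pairs is 32-bit addition
theorem pvLimbAdd (x y xl xh yl yh : Int) (hx : pvRep x (xl, xh)) (hy : pvRep y (yl, yh)) :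
    pvRep ((x + y) % 4294967296)
      ((xl + yl) % 65536, (xh + yh + (xl + yl) / 65536) % 65536) := by
  simp only [pvRep] at *; omega

-- per-limb shift with carry is 32-bit shift (for the four shift amounts used)
theorem pvLimbShl (x xl xh : Int) (k : Nat) (hk : k = 12 ∨ k = 5 ∨ k = 9 ∨ k = 3)
    (hx : pvRep x (xl, xh)) :
    pvRep ((x * 2 ^ k) % 4294967296)
      ((xl * 2 ^ k) % 65536, (xh * 2 ^ k + xl / 2 ^ (16 - k)) % 65536) := by
  simp only [pvRep] at *
  rcases hk with rfl | rfl | rfl | rfl <;> norm_num <;> omega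

-- limbwise xor is 32-bit xor
theorem pvRepXor (x y xl xh yl yh : Int) (hx : pvRep x (xl, xh)) (hy : pvRep y (yl, yh)) :
    pvRep (Int.xor x y) (Int.xor xl yl, Int.xor xh yh) := by
  obtain ⟨hx1, hx2, hx3, hx4, hx5, hx6, hx7⟩ := hx
  obtain ⟨hy1, hy2, hy3, hy4, hy5, hy6, hy7⟩ := hy
  have e := pvIntLimbXor x y hx6 hy6
  have ex1 : x % 65536 = xl := by omega
  have ex2 : x / 65536 = xh := by omega
  have ey1 : y % 65536 = yl := by omega
  have ey2 : y / 65536 = yh := by omega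
  rw [ex1, ex2, ey1, ey2] at e
  have b1 := pvXorNonneg xl yl hx1 hy1
  have b2 := pvXorLt16 xl yl hx1 hx2 hy1 hy2
  have b3 := pvXorNonneg xh yh hx3 hy3
  have b4 := pvXorLt16 xh yh hx3 hx4 hy3 hy4
  exact ⟨b1, b2, b3, b4, e.symm, by omega, by omega⟩

theorem pvStage1 (a : Int) :
    pvRep (pvStep ("+", 0x7ED55D16, "+", "<<", 12) a)
      (pvB1 ((a % 4294967296) % 65536) ((a % 4294967296) / 65536)) := by
  have t12 : Int.toNat 12 = 12 := rfl
  have heq : pvStep ("+", 0x7ED55D16, "+", "<<", 12) a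
      = pvStep ("+", 0x7ED55D16, "+", "<<", 12) (a % 4294967296) := by
    simp only [pvStep, myhashFns, myhashR, String.reduceEq, reduceIte, t12,
      Int.shiftLeft_eq, pvModM]
    norm_num
    omega
  rw [heq]
  have hp : pvRep (a % 4294967296) ((a % 4294967296) % 65536, (a % 4294967296) / 65536) := by
    simp only [pvRep]; omega
  have hC : pvRep 0x7ED55D16 (0x5D16, 0x7ED5) := by simp only [pvRep]; norm_num
  have hs := pvLimbAdd _ _ _ _ _ _ hp hC
  have ht := pvLimbShl _ _ _ 12 (Or.inl rfl) hp
  norm_num only at hs ht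
  have hf := pvLimbAdd _ _ _ _ _ _ hs ht
  simp only [pvStep, myhashFns, myhashR, pvB1, myhashAdd, myhashShl, String.reduceEq,
    reduceIte, t12, Int.shiftLeft_eq, pvModM, pvMod16, pvDiv16, pvDivP, Nat.reduceSub]
  norm_num only
  simp only [pvRep] at hf ⊢
  omega

theorem pvStage3 (p : Int) (q : Int × Int) (h : pvRep p q) :
    pvRep (pvStep ("+", 0x165667B1, "+", "<<", 5) p) (pvB3 q.1 q.2) := by
  obtain ⟨l, hh⟩ := q
  have t5 : Int.toNat 5 = 5 := rfl
  have hC : pvRep 0x165667B1 (0x67B1, 0x1656) := by simp only [pvRep]; norm_num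
  have hs := pvLimbAdd _ _ _ _ _ _ h hC
  have ht := pvLimbShl _ _ _ 5 (Or.inr (Or.inl rfl)) h
  norm_num only at hs ht
  have hf := pvLimbAdd _ _ _ _ _ _ hs ht
  simp only [pvStep, myhashFns, myhashR, pvB3, myhashAdd, myhashShl, String.reduceEq,
    reduceIte, t5, Int.shiftLeft_eq, pvModM, pvMod16, pvDiv16, pvDivP, Nat.reduceSub]
  norm_num only
  simp only [pvRep] at hf ⊢
  omega

theorem pvStage5 (p : Int) (q : Int × Int) (h : pvRep p q) :
    pvRep (pvStep ("+", 0xFD7046C5, "+", "<<", 3) p) (pvB5 q.1 q.2) := by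
  obtain ⟨l, hh⟩ := q
  have t3 : Int.toNat 3 = 3 := rfl
  have hC : pvRep 0xFD7046C5 (0x46C5, 0xFD70) := by simp only [pvRep]; norm_num
  have hs := pvLimbAdd _ _ _ _ _ _ h hC
  have ht := pvLimbShl _ _ _ 3 (Or.inr (Or.inr (Or.inr rfl))) h
  norm_num only at hs ht
  have hf := pvLimbAdd _ _ _ _ _ _ hs ht
  simp only [pvStep, myhashFns, myhashR, pvB5, myhashAdd, myhashShl, String.reduceEq,
    reduceIte, t3, Int.shiftLeft_eq, pvModM, pvMod16, pvDiv16, pvDivP, Nat.reduceSub]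
  norm_num only
  simp only [pvRep] at hf ⊢
  omega

theorem pvStage2 (p : Int) (q : Int × Int) (h : pvRep p q) :
    pvRep (pvStep ("^", 0xC761C23C, "^", ">>", 19) p) (pvB2 q.1 q.2) := by
  obtain ⟨l, hh⟩ := q
  have t19 : Int.toNat 19 = 19 := rfl
  obtain ⟨h1, h2, h3, h4, h5, h6, h7⟩ := h
  have hC : pvRep 0xC761C23C (0xC23C, 0xC761) := by simp only [pvRep]; norm_num
  have hxC := pvRepXor p 0xC761C23C l hh 0xC23C 0xC761 ⟨h1, h2, h3, h4, h5, h6, h7⟩ hC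
  have hshr : p >>> (19:Nat) = hh / 8 := by
    rw [pvShrDiv p 19 h6]; norm_num; omega
  have hr : pvRep (hh / 8) (hh / 8, 0) := by simp only [pvRep]; omega
  have hout := pvRepXor _ _ _ _ _ _ hxC hr
  rw [pvXorZero _ (pvXorNonneg _ _ h3 hC.2.2.1)] at hout
  simp only [pvStep, myhashFns, myhashR, pvB2, String.reduceEq, reduceIte, t19, pvModM, pvDiv8]
  rw [hshr, Int.emod_eq_of_lt hxC.2.2.2.2.2.1 hxC.2.2.2.2.2.2,
      Int.emod_eq_of_lt (by omega) (by omega : hh / 8 < (4294967296:Int)),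
      Int.emod_eq_of_lt hout.2.2.2.2.2.1 hout.2.2.2.2.2.2]
  exact hout

theorem pvStage6 (p : Int) (q : Int × Int) (h : pvRep p q) :
    pvRep (pvStep ("^", 0xB55A4F09, "^", ">>", 16) p) (pvB6 q.1 q.2) := by
  obtain ⟨l, hh⟩ := q
  have t16 : Int.toNat 16 = 16 := rfl
  obtain ⟨h1, h2, h3, h4, h5, h6, h7⟩ := h
  have hC : pvRep 0xB55A4F09 (0x4F09, 0xB55A) := by simp only [pvRep]; norm_num
  have hxC := pvRepXor p 0xB55A4F09 l hh 0x4F09 0xB55A ⟨h1, h2, h3, h4, h5, h6, h7⟩ hC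
  have hshr : p >>> (16:Nat) = hh := by
    rw [pvShrDiv p 16 h6]; norm_num; omega
  have hr : pvRep hh (hh, 0) := by simp only [pvRep]; omega
  have hout := pvRepXor _ _ _ _ _ _ hxC hr
  rw [pvXorZero _ (pvXorNonneg _ _ h3 hC.2.2.1)] at hout
  simp only [pvStep, myhashFns, myhashR, pvB6, String.reduceEq, reduceIte, t16, pvModM]
  rw [hshr, Int.emod_eq_of_lt hxC.2.2.2.2.2.1 hxC.2.2.2.2.2.2,
      Int.emod_eq_of_lt (by omega) (by omega : hh < (4294967296:Int)),
      Int.emod_eq_of_lt hout.2.2.2.2.2.1 hout.2.2.2.2.2.2]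
  exact hout

theorem pvStage4 (p : Int) (q : Int × Int) (h : pvRep p q) :
    pvRep (pvStep ("+", 0xD3A2646C, "^", "<<", 9) p) (pvB4 q.1 q.2) := by
  obtain ⟨l, hh⟩ := q
  have t9 : Int.toNat 9 = 9 := rfl
  have hC : pvRep 0xD3A2646C (0x646C, 0xD3A2) := by simp only [pvRep]; norm_num
  have hs := pvLimbAdd _ _ _ _ _ _ h hC
  have ht := pvLimbShl _ _ _ 9 (Or.inr (Or.inr (Or.inl rfl))) h
  norm_num only at hs ht
  have hout := pvRepXor _ _ _ _ _ _ hs ht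
  simp only [pvStep, myhashFns, myhashR, pvB4, myhashAdd, myhashShl, String.reduceEq,
    reduceIte, t9, Int.shiftLeft_eq, pvModM, pvMod16, pvDiv16, pvDivP, Nat.reduceSub]
  norm_num only
  rw [Int.emod_eq_of_lt hout.2.2.2.2.2.1 hout.2.2.2.2.2.2]
  convert hout using 2

-- ===== VERDICT (by name: the statement is the Claim_ definition above) =====
theorem myhash_spec : Claim_equal_myhash := by
  intro a _
  show myhash a = myhash_alt a
  have h1 := pvStage1 a
  have h2 := pvStage2 _ _ h1
  have h3 := pvStage3 _ _ h2
  have h4 := pvStage4 _ _ h3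
  have h5 := pvStage5 _ _ h4
  have h6 := pvStage6 _ _ h5
  rw [pvDecomp, pvAltDecomp]
  simp only [pvP, pvMod16, pvDiv16, pvModM'] at *
  obtain ⟨-, -, -, -, hval, -, -⟩ := h6
  omega
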